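-- pv_equiv track=rewrite | github.com/oasisconsult/autobackend | app/services/activation_engine.py | check_activation
-- ===== SOURCE A (Python) =====
-- def check_activation(user_events: list):
--
--     has_created_project = any(
--         e["type"] == "project_created"
--         for e in user_events
--     )
--
--     has_run_generation = any(
--         e["type"] == "generation_success"
--         for e in user_events
--     )
--
--     return has_created_project and has_run_generation
-- ===== SOURCE B (Python) =====
-- def check_activation(user_events: list):
--     has_created_project = False
--     has_run_generation = False
--     for e in user_events:
--         t = e["type"]
--         if t == "project_created":
--             has_created_project = True
--         elif t == "generation_success":
--             has_run_generation = True
--         if has_created_project and has_run_generation: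
--             break
--     return has_created_project and has_run_generation
-- ===== Notes on version B (the rewrite author's own statement) =====
-- stated objective: simpler
-- what changed: Replaces A's two separate short-circuiting any() scans with one single pass that maintains both flags and breaks as soon as both are set (touching exactly the same prefix of events as A's two passes combined).
import Mathlib
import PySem

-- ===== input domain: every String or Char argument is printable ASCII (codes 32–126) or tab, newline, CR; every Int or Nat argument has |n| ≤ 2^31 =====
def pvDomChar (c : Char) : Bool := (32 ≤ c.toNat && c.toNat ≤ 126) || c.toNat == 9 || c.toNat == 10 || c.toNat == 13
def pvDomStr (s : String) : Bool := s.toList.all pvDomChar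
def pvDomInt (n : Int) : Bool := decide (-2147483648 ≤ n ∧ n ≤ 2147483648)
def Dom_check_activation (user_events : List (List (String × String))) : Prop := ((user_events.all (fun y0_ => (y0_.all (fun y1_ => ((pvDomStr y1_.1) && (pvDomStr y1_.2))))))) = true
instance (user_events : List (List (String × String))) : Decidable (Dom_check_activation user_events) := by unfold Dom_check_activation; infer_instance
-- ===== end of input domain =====

-- B replaces A's two separate short-circuiting any() scans with one single pass over the
-- events that maintains both flags and breaks as soon as both are set; return value only.

-- ===== PORT A =====
def check_activation (user_events : List (List (String × String))) : Bool :=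
  let has_created_project :=
    user_events.any (fun e => (PySem.Dict.mk e).get? "type" == some "project_created")
  let has_run_generation :=
    user_events.any (fun e => (PySem.Dict.mk e).get? "type" == some "generation_success")
  has_created_project && has_run_generation

-- ===== PORT B =====
-- loop of Source B: two flags, early break once both are set; e["type"] via Dict.get?
-- (missing key = Python KeyError, excluded by Pre_; getD "" there is harmless).
def checkActivationLoop : List (List (String × String)) → Bool → Bool → Bool
  | [], cp, rg => cp && rg
  | e :: rest, cp, rg =>
    let t := ((PySem.Dict.mk e).get? "type").getD ""
    let cp' := if t == "project_created" then true else cp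
    let rg' := if t == "project_created" then rg
               else if t == "generation_success" then true else rg
    if cp' && rg' then cp' && rg' else checkActivationLoop rest cp' rg'

def check_activation_alt (user_events : List (List (String × String))) : Bool :=
  checkActivationLoop user_events false false

-- ===== PRECONDITION & SPEC =====
-- Pre_ excludes exactly the inputs on which the Python A raises KeyError: an event
-- without a "type" key that A's scans still touch, i.e. one not preceded both by a
-- project_created event and by a generation_success event.
def Pre_check_activation (user_events : List (List (String × String))) : Prop :=
  ∀ i ∈ List.range user_events.length,
    ((PySem.Dict.mk (user_events.getD i [])).get? "type").isSome = false →
      ((∃ j ∈ List.range i,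
          (PySem.Dict.mk (user_events.getD j [])).get? "type" = some "project_created") ∧
       (∃ j ∈ List.range i,
          (PySem.Dict.mk (user_events.getD j [])).get? "type" = some "generation_success"))
instance (user_events : List (List (String × String))) : Decidable (Pre_check_activation user_events) := by unfold Pre_check_activation; infer_instance

def pvWitness_check_activation : (List (List (String × String))) :=
  [[("type", "project_created")], [("type", "generation_success")]]

def Spec_check_activation (user_events : List (List (String × String))) (out : Bool) : Prop := out = check_activation_alt user_events
instance (user_events : List (List (String × String))) (out : Bool) : Decidable (Spec_check_activation user_events out) := by unfold Spec_check_activation; infer_instance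

-- ===== CLAIM (what is proved, stated in full; the proofs are below) =====
def Claim_equal_check_activation : Prop := ∀ (user_events : List (List (String × String))), Dom_check_activation user_events → Pre_check_activation user_events → Spec_check_activation user_events (check_activation user_events)

-- ===== LEMMAS AND PROOFS =====

-- the loop computes (cp || any project_created) && (rg || any generation_success)
theorem checkActivationLoop_eq (xs : List (List (String × String))) :
    ∀ cp rg : Bool,
      checkActivationLoop xs cp rg =
        ((cp || xs.any (fun e => (PySem.Dict.mk e).get? "type" == some "project_created")) &&
         (rg || xs.any (fun e => (PySem.Dict.mk e).get? "type" == some "generation_success"))) := by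
  induction xs with
  | nil => intro cp rg; simp [checkActivationLoop]
  | cons e rest ih =>
    intro cp rg
    simp only [checkActivationLoop, List.any_cons]
    cases h : (PySem.Dict.mk e).get? "type" with
    | none =>
      simp only [h, Option.getD_none]
      have h1 : ("" == "project_created") = false := by decide
      have h2 : ("" == "generation_success") = false := by decide
      simp only [h1, h2, if_false]
      cases cp <;> cases rg <;> simp [ih]
    | some v =>
      simp only [h, Option.getD_some]
      by_cases hv1 : v = "project_created"
      · subst hv1
        simp only [beq_self_eq_true, if_true, ih]
        have : (some "project_created" == some "generation_success") = false := by decide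
        simp only [beq_self_eq_true, this]
        cases rg <;>
          simp [List.any_cons, ih]
      · have h1 : (v == "project_created") = false := by
          simp [hv1]
        by_cases hv2 : v = "generation_success"
        · subst hv2
          simp only [h1, if_false, beq_self_eq_true, if_true, ih]
          have : (some "generation_success" == some "project_created") = false := by decide
          simp only [this]
          cases cp <;> simp [List.any_cons, ih]
        · have h2 : (v == "generation_success") = false := by simp [hv2]
          simp only [h1, h2, if_false, ih]
          have g1 : (some v == some "project_created") = false := by simp [hv1]
          have g2 : (some v == some "generation_success") = false := by simp [hv2]
          simp only [g1, g2]
          cases cp <;> cases rg <;> simp [ih]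

-- ===== VERDICT (by name: the statement is the Claim_ definition above) =====
theorem check_activation_spec : Claim_equal_check_activation := by
  intro xs _ _
  unfold Spec_check_activation check_activation check_activation_alt
  rw [checkActivationLoop_eq]
  simp
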